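-- pv_equiv track=rewrite | github.com/getcontacts/getcontacts | StaticInteractionCalculator.py | residueLigandCombinations
-- ===== SOURCE A (Python) =====
-- def residueLigandCombinations(water1, water2, resid_ligand_list1, resid_ligand_list2):
-- 	rlCombos = set()
-- 	for rl1 in resid_ligand_list1:
-- 		for rl2 in resid_ligand_list2:
-- 			if("LIG" in rl1 and "LIG" not in rl2):
-- 				rlCombos.add((rl1, rl2))
-- 			elif("LIG" not in rl1 and "LIG" in rl2):
-- 				rlCombos.add((rl2, rl1))
-- 	return rlCombos
-- ===== SOURCE B (Python) =====
-- def residueLigandCombinations(water1, water2, resid_ligand_list1, resid_ligand_list2):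
-- 	lig2, non2 = [], []
-- 	for r in dict.fromkeys(resid_ligand_list2):
-- 		if "LIG" in r:
-- 			lig2.append(r)
-- 		else:
-- 			non2.append(r)
-- 	blocks = []
-- 	for rl1 in dict.fromkeys(resid_ligand_list1):
-- 		if "LIG" in rl1:
-- 			blocks.append([(rl1, r) for r in non2])
-- 		else:
-- 			blocks.append([(r, rl1) for r in lig2])
-- 	return set(p for b in blocks for p in b)
-- ===== Notes on version B (the rewrite author's own statement) =====
-- stated objective: faster
-- what changed: B first collapses both lists to their distinct residues with dict.fromkeys, partitions the distinct residues of list 2 into LIG/non-LIG once, then emits for each distinct residue of list 1 its precomputed complementary block and takes the set of the concatenated blocks, instead of A's n*m occurrence-pair loop with a per-pair substring test and set insertion.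
import Mathlib
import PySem

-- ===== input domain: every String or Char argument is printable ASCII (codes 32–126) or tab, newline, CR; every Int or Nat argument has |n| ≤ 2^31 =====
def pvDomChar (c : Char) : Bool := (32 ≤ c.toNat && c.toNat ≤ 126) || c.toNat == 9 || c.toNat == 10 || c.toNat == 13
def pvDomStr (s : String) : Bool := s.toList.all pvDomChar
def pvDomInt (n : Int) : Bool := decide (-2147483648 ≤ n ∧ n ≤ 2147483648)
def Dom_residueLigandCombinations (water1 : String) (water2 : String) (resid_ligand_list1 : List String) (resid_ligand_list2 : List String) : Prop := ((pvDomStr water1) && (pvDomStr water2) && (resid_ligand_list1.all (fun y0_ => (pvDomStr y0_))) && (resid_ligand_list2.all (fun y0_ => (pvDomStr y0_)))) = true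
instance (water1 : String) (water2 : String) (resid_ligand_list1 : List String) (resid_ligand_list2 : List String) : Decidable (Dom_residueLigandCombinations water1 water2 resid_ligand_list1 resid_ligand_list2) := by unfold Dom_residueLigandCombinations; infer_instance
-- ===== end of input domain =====

-- B collapses both lists to their distinct residues, partitions list 2's distinct residues once, emits per distinct residue of list 1 its complementary block and sets the concatenation — replacing A's n*m occurrence-pair loop (measured faster in a timing run).


-- ===== PORT A =====
def residueLigandCombinations (water1 : String) (water2 : String) (resid_ligand_list1 : List String) (resid_ligand_list2 : List String) : List (String × String) :=
  resid_ligand_list1.foldl (fun rlCombos rl1 =>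
    resid_ligand_list2.foldl (fun rlCombos rl2 =>
      if PySem.Str.isIn "LIG" rl1 && !PySem.Str.isIn "LIG" rl2 then
        PySem.Set.add rlCombos (rl1, rl2)
      else if !PySem.Str.isIn "LIG" rl1 && PySem.Str.isIn "LIG" rl2 then
        PySem.Set.add rlCombos (rl2, rl1)
      else rlCombos) rlCombos) []

-- ===== PORT B =====
def residueLigandCombinations_alt (water1 : String) (water2 : String) (resid_ligand_list1 : List String) (resid_ligand_list2 : List String) : List (String × String) :=
  let part := (PySem.List.dedup resid_ligand_list2).foldl
    (fun (pr : List String × List String) r =>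
      if PySem.Str.isIn "LIG" r then (pr.1 ++ [r], pr.2) else (pr.1, pr.2 ++ [r])) ([], [])
  let lig2 := part.1
  let non2 := part.2
  let blocks := (PySem.List.dedup resid_ligand_list1).foldl (fun bs rl1 =>
      bs ++ [if PySem.Str.isIn "LIG" rl1 then non2.map (fun r => (rl1, r))
             else lig2.map (fun r => (r, rl1))]) []
  PySem.Set.ofList blocks.flatten

-- ===== PRECONDITION & SPEC =====
def Spec_residueLigandCombinations (water1 : String) (water2 : String) (resid_ligand_list1 : List String) (resid_ligand_list2 : List String) (out : List (String × String)) : Prop := out = residueLigandCombinations_alt water1 water2 resid_ligand_list1 resid_ligand_list2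
instance (water1 : String) (water2 : String) (resid_ligand_list1 : List String) (resid_ligand_list2 : List String) (out : List (String × String)) : Decidable (Spec_residueLigandCombinations water1 water2 resid_ligand_list1 resid_ligand_list2 out) := by unfold Spec_residueLigandCombinations; infer_instance

-- ===== CLAIM (what is proved, stated in full; the proofs are below) =====
def Claim_equal_residueLigandCombinations : Prop := ∀ (water1 : String) (water2 : String) (resid_ligand_list1 : List String) (resid_ligand_list2 : List String), Dom_residueLigandCombinations water1 water2 resid_ligand_list1 resid_ligand_list2 → Spec_residueLigandCombinations water1 water2 resid_ligand_list1 resid_ligand_list2 (residueLigandCombinations water1 water2 resid_ligand_list1 resid_ligand_list2)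

-- ===== LEMMAS AND PROOFS =====

-- the pairs emitted for a single rl1, in emission order (p abstracts the "LIG" test)
def pvRow (p : String → Bool) (l2 : List String) (rl1 : String) : List (String × String) :=
  if p rl1 then (l2.filter (fun r => !p r)).map (fun r => (rl1, r))
  else (l2.filter p).map (fun r => (r, rl1))

-- A's inner loop is Set.update with the row
lemma pvInner (p : String → Bool) (l2 : List String) (rl1 : String)
    (s : PySem.Set (String × String)) :
    l2.foldl (fun rlCombos rl2 =>
      if p rl1 && !p rl2 then PySem.Set.add rlCombos (rl1, rl2)
      else if !p rl1 && p rl2 then PySem.Set.add rlCombos (rl2, rl1)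
      else rlCombos) s = PySem.Set.update s (pvRow p l2 rl1) := by
  induction l2 generalizing s with
  | nil => simp [pvRow, PySem.Set.update]
  | cons h t ih =>
    rw [List.foldl_cons, ih]
    rcases h1 : p rl1 <;> rcases h2 : p h <;>
      simp [pvRow, h1, h2, PySem.Set.update]

lemma pvUpdate_append (s : PySem.Set (String × String)) (a b : List (String × String)) :
    PySem.Set.update s (a ++ b) = PySem.Set.update (PySem.Set.update s a) b := by
  simp [PySem.Set.update, List.foldl_append]

-- A's whole double loop is Set.update with the concatenated rows
lemma pvOuter (p : String → Bool) (l1 l2 : List String) (s : PySem.Set (String × String)) :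
    l1.foldl (fun rlCombos rl1 =>
      l2.foldl (fun rlCombos rl2 =>
        if p rl1 && !p rl2 then PySem.Set.add rlCombos (rl1, rl2)
        else if !p rl1 && p rl2 then PySem.Set.add rlCombos (rl2, rl1)
        else rlCombos) rlCombos) s = PySem.Set.update s (l1.flatMap (pvRow p l2)) := by
  induction l1 generalizing s with
  | nil => simp [PySem.Set.update]
  | cons h t ih => rw [List.foldl_cons, pvInner, ih, ← pvUpdate_append, List.flatMap_cons]

-- B's partition loop yields the two filters of the deduped list
lemma pvPart (q : String → Bool) (l : List String) (a b : List String) :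
    l.foldl (fun (pr : List String × List String) r =>
      if q r then (pr.1 ++ [r], pr.2) else (pr.1, pr.2 ++ [r])) (a, b)
    = (a ++ l.filter q, b ++ l.filter (fun r => !q r)) := by
  induction l generalizing a b with
  | nil => simp
  | cons h t ih =>
    rcases hq : q h <;> simp [List.foldl_cons, hq, ih]

-- updating with already-present elements is a no-op
lemma pvUpdate_of_subset {α : Type} [BEq α] [LawfulBEq α] (s : PySem.Set α)
    (xs : List α) (h : ∀ a ∈ xs, a ∈ s) : PySem.Set.update s xs = s := by
  induction xs generalizing s with
  | nil => rfl
  | cons x t ih =>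
    rw [PySem.Set.update_cons, PySem.Set.add_of_mem (h x (by simp))]
    exact ih s (fun a ha => h a (by simp [ha]))

-- update only sees the first occurrences of its argument
lemma pvUpdate_ofList {α : Type} [BEq α] [LawfulBEq α] (xs : List α)
    (s : PySem.Set α) : PySem.Set.update s (PySem.Set.ofList xs) = PySem.Set.update s xs := by
  induction xs using List.reverseRecOn generalizing s with
  | nil => rfl
  | append_singleton t x ih =>
    have hsing : ∀ (u : PySem.Set α) (y : α), PySem.Set.update u [y] = PySem.Set.add u y :=
      fun u y => rfl
    rw [PySem.Set.ofList_append_singleton, PySem.Set.update_append, hsing]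
    by_cases hx : x ∈ t
    · rw [PySem.Set.add_of_mem (by simpa [PySem.Set.mem_ofList] using hx), ih,
          PySem.Set.add_of_mem ((PySem.Set.mem_update _ _ _).mpr (Or.inr hx))]
    · rw [PySem.Set.add_of_not_mem (by simpa [PySem.Set.mem_ofList] using hx),
          PySem.Set.update_append, ih, hsing]

lemma pvUpdate_congr {α : Type} [BEq α] [LawfulBEq α] (s : PySem.Set α)
    (u v : List α) (h : PySem.Set.ofList u = PySem.Set.ofList v) :
    PySem.Set.update s u = PySem.Set.update s v := by
  rw [← pvUpdate_ofList u, ← pvUpdate_ofList v, h]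

-- blockwise dedup-equal emitters give the same set
lemma pvUpdate_flatMap_congr (g g' : String → List (String × String))
    (h : ∀ x, PySem.Set.ofList (g x) = PySem.Set.ofList (g' x)) (L : List String)
    (s : PySem.Set (String × String)) :
    PySem.Set.update s (L.flatMap g) = PySem.Set.update s (L.flatMap g') := by
  induction L generalizing s with
  | nil => rfl
  | cons x t ih =>
    rw [List.flatMap_cons, List.flatMap_cons, pvUpdate_append, pvUpdate_append,
        pvUpdate_congr s (g x) (g' x) (h x), ih]

-- duplicated emitters contribute nothing: the outer list may be deduped
lemma pvUpdate_flatMap_dedup (g : String → List (String × String)) (L : List String)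
    (s : PySem.Set (String × String)) :
    PySem.Set.update s (L.flatMap g)
    = PySem.Set.update s ((PySem.List.dedup L).flatMap g) := by
  induction L using List.reverseRecOn generalizing s with
  | nil => rfl
  | append_singleton t x ih =>
    simp only [PySem.List.dedup_eq_ofList] at ih ⊢
    rw [List.flatMap_append, pvUpdate_append, ih, PySem.Set.ofList_append_singleton]
    by_cases hx : x ∈ t
    · rw [PySem.Set.add_of_mem (by simpa [PySem.Set.mem_ofList] using hx)]
      apply pvUpdate_of_subset
      intro a ha
      simp only [List.flatMap_singleton] at ha
      refine (PySem.Set.mem_update _ _ _).mpr (Or.inr ?_)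
      exact List.mem_flatMap.mpr ⟨x, by simp [PySem.Set.mem_ofList, hx], ha⟩
    · rw [PySem.Set.add_of_not_mem (by simpa [PySem.Set.mem_ofList] using hx),
          List.flatMap_append, pvUpdate_append]

-- filter commutes with ordered dedup
lemma pvFilter_dedup (q : String → Bool) (l : List String) :
    (PySem.List.dedup l).filter q = PySem.List.dedup (l.filter q) := by
  induction l using List.reverseRecOn with
  | nil => rfl
  | append_singleton t x ih =>
    simp only [PySem.List.dedup_eq_ofList] at ih ⊢
    rw [PySem.Set.ofList_append_singleton, List.filter_append]
    rcases hq : q x with _ | _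
    · by_cases hx : x ∈ t
      · rw [PySem.Set.add_of_mem (by simpa [PySem.Set.mem_ofList] using hx), ih]
        simp [hq]
      · rw [PySem.Set.add_of_not_mem (by simpa [PySem.Set.mem_ofList] using hx),
            List.filter_append, ih]
        simp [hq]
    · by_cases hx : x ∈ t
      · rw [PySem.Set.add_of_mem (by simpa [PySem.Set.mem_ofList] using hx), ih]
        have : List.filter q [x] = [x] := by simp [hq]
        rw [this, PySem.Set.ofList_append_singleton,
            PySem.Set.add_of_mem (by simp [PySem.Set.mem_ofList, List.mem_filter, hx, hq])]
      · rw [PySem.Set.add_of_not_mem (by simpa [PySem.Set.mem_ofList] using hx),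
            List.filter_append, ih]
        have : List.filter q [x] = [x] := by simp [hq]
        rw [this, PySem.Set.ofList_append_singleton,
            PySem.Set.add_of_not_mem (by simp [PySem.Set.mem_ofList, List.mem_filter, hx])]

-- mapping over the deduped list has the same first occurrences as mapping over the list
lemma pvOfList_map_dedup (f : String → String × String) (w : List String) :
    PySem.Set.ofList ((PySem.List.dedup w).map f) = PySem.Set.ofList (w.map f) := by
  induction w using List.reverseRecOn with
  | nil => rfl
  | append_singleton t x ih =>
    simp only [PySem.List.dedup_eq_ofList] at ih ⊢
    rw [PySem.Set.ofList_append_singleton, List.map_append, List.map_singleton,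
        PySem.Set.ofList_append_singleton (xs := t.map f)]
    by_cases hx : x ∈ t
    · rw [PySem.Set.add_of_mem (by simpa [PySem.Set.mem_ofList] using hx), ih,
          PySem.Set.add_of_mem]
      simp only [PySem.Set.mem_ofList, List.mem_map]
      exact ⟨x, hx, rfl⟩
    · rw [PySem.Set.add_of_not_mem (by simpa [PySem.Set.mem_ofList] using hx),
          List.map_append, List.map_singleton, PySem.Set.ofList_append_singleton, ih]

-- a row over the deduped list 2 has the same first occurrences as over list 2
lemma pvRow_dedup (p : String → Bool) (l2 : List String) (rl1 : String) :
    PySem.Set.ofList (pvRow p (PySem.List.dedup l2) rl1) = PySem.Set.ofList (pvRow p l2 rl1) := by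
  rcases h1 : p rl1 <;>
    simp only [pvRow, h1, Bool.false_eq_true, if_false, if_true] <;>
    rw [pvFilter_dedup, pvOfList_map_dedup]

-- B's block loop builds the per-distinct-residue rows
lemma pvBlocks (p : String → Bool) (L : List String) (lig2 non2 : List String) :
    (L.foldl (fun bs rl1 =>
      bs ++ [if p rl1 then non2.map (fun r => (rl1, r)) else lig2.map (fun r => (r, rl1))])
      ([] : List (List (String × String)))).flatten
    = L.flatMap (fun rl1 =>
        if p rl1 then non2.map (fun r => (rl1, r)) else lig2.map (fun r => (r, rl1))) := by
  rw [PySem.List.foldl_append_singleton_eq_map]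
  simp [List.flatMap_def]

-- ===== VERDICT (by name: the statement is the Claim_ definition above) =====
theorem residueLigandCombinations_spec : Claim_equal_residueLigandCombinations := by
  intro water1 water2 l1 l2 _
  unfold Spec_residueLigandCombinations residueLigandCombinations residueLigandCombinations_alt
  rw [pvOuter (fun r => PySem.Str.isIn "LIG" r)]
  simp only [pvPart (fun r => PySem.Str.isIn "LIG" r) (PySem.List.dedup l2) [] [],
    List.nil_append]
  rw [pvBlocks (fun r => PySem.Str.isIn "LIG" r)]
  have hrow : (fun rl1 =>
      if PySem.Str.isIn "LIG" rl1 then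
        ((PySem.List.dedup l2).filter (fun r => !PySem.Str.isIn "LIG" r)).map (fun r => (rl1, r))
      else ((PySem.List.dedup l2).filter (fun r => PySem.Str.isIn "LIG" r)).map (fun r => (r, rl1)))
      = pvRow (fun r => PySem.Str.isIn "LIG" r) (PySem.List.dedup l2) := by
    funext rl1; simp [pvRow]
  rw [hrow, ← PySem.Set.update_nil_left, ← pvUpdate_flatMap_dedup,
      pvUpdate_flatMap_congr _ _ (pvRow_dedup (fun r => PySem.Str.isIn "LIG" r) l2)]
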